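-- pv_equiv track=rewrite | github.com/Luccatp/alest2 | teste.py | bfs
-- ===== SOURCE A (Python) =====
-- from collections import deque
--
-- def bfs(graph, start):
--     visited = set()
--     queue = deque()
--
--     visited.add(start)
--     queue.append(start)
--
--     objectives = []
--     while queue:
--         node = queue.popleft()
--
--         if node.isdigit():
--             objectives.append(int(node))
--
--         if node in graph:
--             for neighbor in graph[node]:
--                 if neighbor not in visited:
--                     visited.add(neighbor)
--                     queue.append(neighbor)
--
--     objectives.sort()
--     return objectives
-- ===== SOURCE B (Python) =====
-- def bfs(graph, start):
--     visited = set()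
--     stack = [start]
--     objectives = []
--     while stack:
--         node = stack.pop()
--         if node in visited:
--             continue
--         visited.add(node)
--         if node.isdigit():
--             objectives.append(int(node))
--         for neighbor in graph.get(node, []):
--             stack.append(neighbor)
--     objectives.sort()
--     return objectives
-- ===== Notes on version B (the rewrite author's own statement) =====
-- stated objective: alternative
-- what changed: Replaces the FIFO-queue BFS that marks nodes visited at enqueue time with an iterative LIFO-stack DFS that pushes all neighbors and deduplicates at pop time; the final sort makes the traversal order irrelevant.
import Mathlib
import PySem

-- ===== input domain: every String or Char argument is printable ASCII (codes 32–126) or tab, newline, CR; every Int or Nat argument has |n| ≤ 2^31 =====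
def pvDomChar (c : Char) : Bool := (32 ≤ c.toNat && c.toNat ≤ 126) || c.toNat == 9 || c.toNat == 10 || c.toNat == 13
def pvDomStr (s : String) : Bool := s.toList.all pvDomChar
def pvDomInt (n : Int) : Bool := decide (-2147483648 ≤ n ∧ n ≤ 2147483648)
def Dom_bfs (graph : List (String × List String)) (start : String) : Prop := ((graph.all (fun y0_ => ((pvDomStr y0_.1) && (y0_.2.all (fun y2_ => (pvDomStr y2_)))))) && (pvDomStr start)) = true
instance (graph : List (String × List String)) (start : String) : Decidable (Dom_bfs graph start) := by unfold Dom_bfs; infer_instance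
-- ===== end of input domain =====

-- B replaces A's FIFO-queue BFS (visited marked at enqueue time) by an iterative LIFO-stack DFS
-- (all neighbors pushed, visited checked at pop time); the final sort makes traversal order irrelevant.

-- ===== PORT A =====
-- int(s): exact under s.isdigit() (nonempty, ASCII digits only), the only guard under which the ports call it
def pvInt (s : String) : Int := (PySem.Int.ofStr? s).getD 0

-- unvisited count: first component of both loops' termination measure
def pvUnvis (U : List String) (vis : List String) : Nat :=
  (U.filter (fun x => !vis.contains x)).length

-- every string a loop can ever add to `visited` beyond its initial stack/queue content
def pvUniv (graph : List (String × List String)) : List String :=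
  graph.map Prod.fst ++ graph.flatMap Prod.snd

theorem pvUnvis_mono {U v v' : List String} (h : ∀ x, x ∈ v → x ∈ v') :
    (U.filter (fun y => !v'.contains y)).Sublist (U.filter (fun y => !v.contains y)) := by
  refine List.monotone_filter_right U ?_
  intro a ha
  simp only [Bool.not_eq_true', ← Bool.not_eq_true, List.contains_iff_mem] at ha ⊢
  exact fun hm => ha (h a hm)

theorem pvUnvis_le {U v v' : List String} (h : ∀ x, x ∈ v → x ∈ v') :
    pvUnvis U v' ≤ pvUnvis U v :=
  (pvUnvis_mono h).length_le

theorem pvUnvis_lt {U v v' : List String} (h : ∀ x, x ∈ v → x ∈ v')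
    {x : String} (hxU : x ∈ U) (hxv : x ∉ v) (hxv' : x ∈ v') :
    pvUnvis U v' < pvUnvis U v := by
  refine Nat.lt_of_le_of_ne (pvUnvis_le h) (fun heq => ?_)
  have heql := (pvUnvis_mono h).eq_of_length heq
  have hx1 : x ∈ U.filter (fun y => !v.contains y) := by
    simp only [List.mem_filter, Bool.not_eq_eq_eq_not, Bool.not_true, ← Bool.not_eq_true,
      List.contains_iff_mem]
    exact ⟨hxU, by simpa using hxv⟩
  rw [← heql] at hx1
  simp only [List.mem_filter, Bool.not_eq_eq_eq_not, Bool.not_true, ← Bool.not_eq_true,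
    List.contains_iff_mem] at hx1
  exact absurd hxv' (by simpa using hx1.2)

theorem pvLexHelper {a a' b b' : Nat} (h1 : a' ≤ a) (h2 : a' < a ∨ b' < b) :
    Prod.Lex (· < ·) (· < ·) (a', b') (a, b) := by
  rcases Nat.lt_or_ge a' a with h | h
  · exact Prod.Lex.left _ _ h
  · have ha : a' = a := le_antisymm h1 h
    subst ha
    rcases h2 with h2 | h2
    · exact absurd h2 (lt_irrefl _)
    · exact Prod.Lex.right _ h2

-- the inner `for neighbor in graph[node]` loop of A
def bfsPush (vis : PySem.Set String) (queue : List String) (nbrs : List String) :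
    PySem.Set String × List String :=
  nbrs.foldl (fun st nbr =>
    if st.1.contains nbr then st else (PySem.Set.add st.1 nbr, st.2 ++ [nbr])) (vis, queue)

theorem bfsPush_eq (nbrs : List String) : ∀ (vis queue : List String), ∃ new : List String,
    bfsPush vis queue nbrs = (vis ++ new, queue ++ new) ∧ new.Nodup ∧
    (∀ x ∈ new, x ∈ nbrs ∧ x ∉ vis) ∧ (∀ x ∈ nbrs, x ∉ vis → x ∈ new) := by
  induction nbrs with
  | nil =>
    intro vis queue
    exact ⟨[], by simp [bfsPush], by simp, by simp, by simp⟩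
  | cons n rest ih =>
    intro vis queue
    by_cases hn : n ∈ vis
    · obtain ⟨new, h1, h2, h3, h4⟩ := ih vis queue
      refine ⟨new, ?_, h2, ?_, ?_⟩
      · rw [← h1]
        simp only [bfsPush, List.foldl_cons]
        rw [if_pos (by simpa [List.contains_iff_mem] using hn)]
      · exact fun x hx => ⟨List.mem_cons_of_mem _ (h3 x hx).1, (h3 x hx).2⟩
      · intro x hx hxv
        rcases List.mem_cons.mp hx with rfl | hx'
        · exact absurd hn hxv
        · exact h4 x hx' hxv
    · obtain ⟨new, h1, h2, h3, h4⟩ := ih (vis ++ [n]) (queue ++ [n])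
      refine ⟨n :: new, ?_, ?_, ?_, ?_⟩
      · simp only [bfsPush, List.foldl_cons]
        rw [if_neg (by simpa [List.contains_iff_mem] using hn)]
        have hadd : PySem.Set.add vis n = vis ++ [n] := by
          simp only [PySem.Set.add]
          rw [if_neg (by simpa [List.contains_iff_mem] using hn)]
        rw [hadd]
        show bfsPush (vis ++ [n]) (queue ++ [n]) rest = (vis ++ n :: new, queue ++ n :: new)
        rw [h1]
        simp
      · refine List.nodup_cons.mpr ⟨fun hc => ?_, h2⟩
        exact (h3 n hc).2 (by simp)
      · intro x hx
        rcases List.mem_cons.mp hx with rfl | hx'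
        · exact ⟨List.mem_cons_self, hn⟩
        · refine ⟨List.mem_cons_of_mem _ (h3 x hx').1, fun hxv => (h3 x hx').2 (by simp [hxv])⟩
      · intro x hx hxv
        rcases List.mem_cons.mp hx with rfl | hx'
        · exact List.mem_cons_self
        · by_cases hxn : x = n
          · subst hxn; exact List.mem_cons_self
          · exact List.mem_cons_of_mem _ (h4 x hx' (by simp [hxv, hxn]))

theorem pvGet?_mem {graph : List (String × List String)} {k : String} {v : List String}
    (h : PySem.Dict.get? (PySem.Dict.mk graph) k = some v) :
    k ∈ graph.map Prod.fst ∧ v ∈ graph.map Prod.snd := by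
  induction graph with
  | nil => simp [PySem.Dict.get?] at h
  | cons p rest ih =>
    rw [PySem.Dict.get?_mk_cons] at h
    by_cases hk : p.1 == k
    · rw [if_pos hk] at h
      refine ⟨?_, ?_⟩
      · simp only [List.map_cons, List.mem_cons]; left; exact (eq_of_beq hk).symm
      · simp only [List.map_cons, List.mem_cons]; left; exact (Option.some_inj.mp h).symm
    · rw [if_neg (by simpa using hk)] at h
      obtain ⟨h1, h2⟩ := ih h
      exact ⟨List.mem_cons_of_mem _ h1, List.mem_cons_of_mem _ h2⟩

theorem pvNbrs_mem_univ {graph : List (String × List String)} {k x : String}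
    (hx : x ∈ PySem.Dict.getD (PySem.Dict.mk graph) k []) : x ∈ pvUniv graph := by
  unfold PySem.Dict.getD at hx
  cases hg : PySem.Dict.get? (PySem.Dict.mk graph) k with
  | none => rw [hg] at hx; simp at hx
  | some v =>
    rw [hg] at hx
    simp only [Option.getD_some] at hx
    obtain ⟨-, h2⟩ := pvGet?_mem hg
    obtain ⟨p, hp, rfl⟩ := List.mem_map.mp h2
    exact List.mem_append_right _ (List.mem_flatMap.mpr ⟨p, hp, hx⟩)

theorem pvKey_mem_univ {graph : List (String × List String)} {k : String}
    (hk : (PySem.Dict.get? (PySem.Dict.mk graph) k).isSome) : k ∈ pvUniv graph := by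
  cases hg : PySem.Dict.get? (PySem.Dict.mk graph) k with
  | none => rw [hg] at hk; simp at hk
  | some v => exact List.mem_append_left _ (pvGet?_mem hg).1

-- the while-loop of A: state (visited, queue, objectives); returns (final visited, objectives)
def bfsLoop (graph : List (String × List String)) (vis : PySem.Set String)
    (queue : List String) (objs : List Int) : PySem.Set String × List Int :=
  match queue with
  | [] => (vis, objs)
  | node :: rest =>
    if (PySem.Dict.get? (PySem.Dict.mk graph) node).isSome then
      bfsLoop graph (bfsPush vis rest (PySem.Dict.getD (PySem.Dict.mk graph) node [])).1
        (bfsPush vis rest (PySem.Dict.getD (PySem.Dict.mk graph) node [])).2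
        (if PySem.Str.strIsdigit node then objs ++ [pvInt node] else objs)
    else
      bfsLoop graph vis rest (if PySem.Str.strIsdigit node then objs ++ [pvInt node] else objs)
  termination_by (pvUnvis (pvUniv graph) vis, queue.length)
  decreasing_by
    · obtain ⟨new, h1, -, h3, -⟩ :=
        bfsPush_eq (PySem.Dict.getD (PySem.Dict.mk graph) node []) vis rest
      rw [h1]
      cases new with
      | nil => exact pvLexHelper (by simp) (Or.inr (by simp))
      | cons x xs =>
        refine pvLexHelper (pvUnvis_le (fun y hy => List.mem_append_left _ hy)) (Or.inl ?_)
        exact pvUnvis_lt (fun y hy => List.mem_append_left _ hy)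
          (pvNbrs_mem_univ (h3 x List.mem_cons_self).1)
          (h3 x List.mem_cons_self).2 (List.mem_append_right _ List.mem_cons_self)
    · exact pvLexHelper (le_refl _) (Or.inr (by simp))

def bfs (graph : List (String × List String)) (start : String) : List Int :=
  let visited := PySem.Set.add PySem.Set.empty start
  let res := bfsLoop graph visited [start] []
  PySem.List.sorted res.2 (fun x => x) false

-- ===== PORT B =====
-- the while-loop of B; the stack's top is the list head (python append/pop act at the end:
-- pushing `nbrs` in order then popping yields them in reverse, hence `nbrs.reverse ++ rest`)
def dfsLoop (graph : List (String × List String)) (stack : List String)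
    (vis : PySem.Set String) (objs : List Int) : PySem.Set String × List Int :=
  match stack with
  | [] => (vis, objs)
  | node :: rest =>
    if h : vis.contains node then dfsLoop graph rest vis objs
    else
      dfsLoop graph ((PySem.Dict.getD (PySem.Dict.mk graph) node []).reverse ++ rest)
        (PySem.Set.add vis node)
        (if PySem.Str.strIsdigit node then objs ++ [pvInt node] else objs)
  termination_by (pvUnvis (pvUniv graph) vis, stack.length)
  decreasing_by
    · exact pvLexHelper (le_refl _) (Or.inr (by simp))
    · have hadd : PySem.Set.add vis node = vis ++ [node] := by
        simp only [PySem.Set.add]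
        rw [if_neg (by simpa using h)]
      rw [hadd]
      by_cases hmem : node ∈ pvUniv graph
      · refine pvLexHelper (pvUnvis_le (fun y hy => List.mem_append_left _ hy)) (Or.inl ?_)
        exact pvUnvis_lt (fun y hy => List.mem_append_left _ hy) hmem
          (by simpa [List.contains_iff_mem] using h) (List.mem_append_right _ List.mem_cons_self)
      · -- node is no key of the graph: its neighbor list is empty and the stack shrinks
        have hnil : PySem.Dict.getD (PySem.Dict.mk graph) node [] = [] := by
          unfold PySem.Dict.getD
          cases hg : PySem.Dict.get? (PySem.Dict.mk graph) node with
          | none => simp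
          | some v => exact absurd (pvKey_mem_univ (by simp [hg])) hmem
        refine pvLexHelper (pvUnvis_le (fun y hy => List.mem_append_left _ hy)) (Or.inr ?_)
        simp [hnil]

def bfs_alt (graph : List (String × List String)) (start : String) : List Int :=
  let res := dfsLoop graph [start] PySem.Set.empty []
  PySem.List.sorted res.2 (fun x => x) false

-- ===== PRECONDITION & SPEC =====
def Spec_bfs (graph : List (String × List String)) (start : String) (out : List Int) : Prop := out = bfs_alt graph start
instance (graph : List (String × List String)) (start : String) (out : List Int) : Decidable (Spec_bfs graph start out) := by unfold Spec_bfs; infer_instance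

-- ===== CLAIM (what is proved, stated in full; the proofs are below) =====
def Claim_equal_bfs : Prop := ∀ (graph : List (String × List String)) (start : String), Dom_bfs graph start → Spec_bfs graph start (bfs graph start)

-- ===== LEMMAS AND PROOFS =====

-- neighbor list of a node (graph[node] if present, else [])
def Nb (graph : List (String × List String)) (v : String) : List String :=
  PySem.Dict.getD (PySem.Dict.mk graph) v []

-- reachability from `s` along neighbor edges: the set both traversals compute
inductive Reach (graph : List (String × List String)) (s : String) : String → Prop
  | base : Reach graph s s
  | step {u v : String} : Reach graph s u → v ∈ Nb graph u → Reach graph s v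

theorem reach_subset {graph : List (String × List String)} {s : String} {V : List String}
    (hs : s ∈ V) (hcl : ∀ v ∈ V, ∀ n ∈ Nb graph v, n ∈ V) :
    ∀ v, Reach graph s v → v ∈ V := by
  intro v hv
  induction hv with
  | base => exact hs
  | step hu hn ih => exact hcl _ ih _ hn

theorem pvFilterPermTrue {vis new rest : List String} {node : String}
    (hndv : vis.Nodup) (hndn : new.Nodup) (hdisj : ∀ x ∈ new, x ∉ vis)
    (hnode : node ∈ vis) (hnrest : node ∉ rest) (hnnew : node ∉ new)
    (hdig : PySem.Str.strIsdigit node = true) :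
    ((vis ++ new).filter (fun v => decide (v ∉ rest ++ new) && PySem.Str.strIsdigit v)).Perm
      ((vis.filter (fun v => decide (v ∉ node :: rest) && PySem.Str.strIsdigit v)) ++ [node]) := by
  refine (List.perm_ext_iff_of_nodup ?_ ?_).mpr ?_
  · exact (List.Nodup.append hndv hndn (fun a ha ha' => hdisj a ha' ha)).filter _
  · refine List.Nodup.append (hndv.filter _) (List.nodup_singleton _) ?_
    intro a ha ha'
    rw [List.mem_singleton.mp ha'] at ha
    have := (List.mem_filter.mp ha).2
    simp at this
  · intro x
    simp only [List.mem_filter, List.mem_append, List.mem_cons, List.not_mem_nil, or_false,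
      Bool.and_eq_true, decide_eq_true_eq]
    have hdx : x ∈ new → x ∉ vis := hdisj x
    by_cases hx : x = node
    · subst hx
      simp [hnode, hnrest, hnnew]
      simpa using hdig
    · constructor
      · rintro ⟨hxv | hxn, hnot, hd⟩
        · refine Or.inl ⟨hxv, ?_, hd⟩
          rintro (h | h)
          · exact hx h
          · exact hnot (Or.inl h)
        · exact absurd (Or.inr hxn) hnot
      · rintro (⟨hxv, hxn, hd⟩ | hxeq)
        · refine ⟨Or.inl hxv, ?_, hd⟩
          rintro (h | h)
          · exact hxn (Or.inr h)
          · exact hdx h hxv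
        · exact absurd hxeq hx

theorem pvFilterPermFalse {vis new rest : List String} {node : String}
    (hndv : vis.Nodup) (hndn : new.Nodup) (hdisj : ∀ x ∈ new, x ∉ vis)
    (hdig : PySem.Str.strIsdigit node = false) :
    ((vis ++ new).filter (fun v => decide (v ∉ rest ++ new) && PySem.Str.strIsdigit v)).Perm
      (vis.filter (fun v => decide (v ∉ node :: rest) && PySem.Str.strIsdigit v)) := by
  refine (List.perm_ext_iff_of_nodup ?_ ?_).mpr ?_
  · exact (List.Nodup.append hndv hndn (fun a ha ha' => hdisj a ha' ha)).filter _
  · exact hndv.filter _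
  · intro x
    simp only [List.mem_filter, List.mem_append, List.mem_cons,
      Bool.and_eq_true, decide_eq_true_eq]
    constructor
    · rintro ⟨hxv | hxn, hnot, hd⟩
      · refine ⟨hxv, ?_, hd⟩
        rintro (h | h)
        · rw [h] at hd
          rw [hdig] at hd
          exact Bool.false_ne_true hd
        · exact hnot (Or.inl h)
      · exact absurd (Or.inr hxn) hnot
    · rintro ⟨hxv, hxn, hd⟩
      refine ⟨Or.inl hxv, ?_, hd⟩
      rintro (h | h)
      · exact hxn (Or.inr h)
      · exact hdisj x h hxv

theorem bfsLoop_spec (graph : List (String × List String)) (s : String) :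
    ∀ (vis : PySem.Set String) (queue : List String) (objs : List Int),
    (∀ q ∈ queue, q ∈ vis) →
    queue.Nodup → vis.Nodup →
    (∀ v ∈ vis, v ∉ queue → ∀ n ∈ Nb graph v, n ∈ vis) →
    objs.Perm ((vis.filter (fun v => decide (v ∉ queue) && PySem.Str.strIsdigit v)).map pvInt) →
    (∀ v ∈ vis, Reach graph s v) →
    (∀ v ∈ vis, v ∈ (bfsLoop graph vis queue objs).1) ∧
    (∀ v ∈ (bfsLoop graph vis queue objs).1, Reach graph s v) ∧
    (∀ v ∈ (bfsLoop graph vis queue objs).1, ∀ n ∈ Nb graph v, n ∈ (bfsLoop graph vis queue objs).1) ∧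
    (bfsLoop graph vis queue objs).1.Nodup ∧
    (bfsLoop graph vis queue objs).2.Perm
      (((bfsLoop graph vis queue objs).1.filter PySem.Str.strIsdigit).map pvInt) := by
  intro vis queue objs
  induction vis, queue, objs using bfsLoop.induct (graph := graph) with
  | case1 vis objs =>
    intro h1 h2 h3 h4 h5 h6
    rw [show bfsLoop graph vis [] objs = (vis, objs) from by rw [bfsLoop]]
    refine ⟨fun v hv => hv, h6, ?_, h3, by simpa using h5⟩
    intro v hv n hn
    exact h4 v hv (by simp) n hn
  | case2 vis objs node rest hin ih =>
    intro h1 h2 h3 h4 h5 h6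
    obtain ⟨new, hpe, hnd, hsub, hcompl⟩ :=
      bfsPush_eq (PySem.Dict.getD (PySem.Dict.mk graph) node []) vis rest
    have hnodevis : node ∈ vis := h1 node List.mem_cons_self
    have hnodenotrest : node ∉ rest := (List.nodup_cons.mp h2).1
    have hrestnd : rest.Nodup := (List.nodup_cons.mp h2).2
    have hnodenotnew : node ∉ new := fun hc => (hsub node hc).2 hnodevis
    rw [show bfsLoop graph vis (node :: rest) objs =
        bfsLoop graph (vis ++ new) (rest ++ new)
          (if PySem.Str.strIsdigit node then objs ++ [pvInt node] else objs) from by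
      rw [bfsLoop]; rw [if_pos hin, hpe]]
    rw [hpe] at ih
    have hdisj' : ∀ x ∈ new, x ∉ vis := fun x hx => (hsub x hx).2
    obtain ⟨g1, g2, g3, g4, g5⟩ := ih
      (by
        intro q hq
        rcases List.mem_append.mp hq with hq | hq
        · exact List.mem_append_left _ (h1 q (List.mem_cons_of_mem _ hq))
        · exact List.mem_append_right _ hq)
      (List.Nodup.append hrestnd hnd
        (fun a ha ha' => hdisj' a ha' (h1 a (List.mem_cons_of_mem _ ha))))
      (List.Nodup.append h3 hnd (fun a ha ha' => hdisj' a ha' ha))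
      (by
        intro v hv hvq n hn
        rcases List.mem_append.mp hv with hv | hv
        · by_cases hvn : v = node
          · subst hvn
            by_cases hnv : n ∈ vis
            · exact List.mem_append_left _ hnv
            · exact List.mem_append_right _ (hcompl n hn hnv)
          · have hvr : v ∉ rest := fun hc => hvq (List.mem_append_left _ hc)
            exact List.mem_append_left _
              (h4 v hv (by simp [hvn, hvr]) n hn)
        · exact absurd (List.mem_append_right rest hv) hvq)
      (by
        by_cases hdig : PySem.Str.strIsdigit node = true
        · rw [dif_pos hdig]
          have hfp := pvFilterPermTrue (node := node) (rest := rest) h3 hnd hdisj'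
            hnodevis hnodenotrest hnodenotnew hdig
          refine List.Perm.trans ?_ (List.Perm.map pvInt hfp.symm)
          rw [List.map_append]
          exact h5.append_right _
        · rw [dif_neg hdig]
          have hfp := pvFilterPermFalse (node := node) (rest := rest) h3 hnd hdisj'
            (by simpa using hdig)
          exact List.Perm.trans h5 (List.Perm.map pvInt hfp.symm))
      (by
        intro v hv
        rcases List.mem_append.mp hv with hv | hv
        · exact h6 v hv
        · exact Reach.step (h6 node hnodevis) (hsub v hv).1)
    exact ⟨fun v hv => g1 v (List.mem_append_left _ hv), g2, g3, g4, g5⟩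
  | case3 vis objs node rest hin ih =>
    intro h1 h2 h3 h4 h5 h6
    have hget : PySem.Dict.get? (PySem.Dict.mk graph) node = none :=
      Option.not_isSome_iff_eq_none.mp hin
    have hNb : Nb graph node = [] := by
      unfold Nb PySem.Dict.getD
      rw [hget]
      rfl
    have hnodevis : node ∈ vis := h1 node List.mem_cons_self
    have hnodenotrest : node ∉ rest := (List.nodup_cons.mp h2).1
    have hrestnd : rest.Nodup := (List.nodup_cons.mp h2).2
    rw [show bfsLoop graph vis (node :: rest) objs =
        bfsLoop graph vis rest
          (if PySem.Str.strIsdigit node then objs ++ [pvInt node] else objs) from by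
      rw [bfsLoop]; rw [if_neg hin]]
    obtain ⟨g1, g2, g3, g4, g5⟩ := ih
      (fun q hq => h1 q (List.mem_cons_of_mem _ hq))
      hrestnd h3
      (by
        intro v hv hvq n hn
        by_cases hvn : v = node
        · subst hvn
          rw [hNb] at hn
          simp at hn
        · exact h4 v hv (by simp [hvn, hvq]) n hn)
      (by
        by_cases hdig : PySem.Str.strIsdigit node = true
        · rw [dif_pos hdig]
          have hfp := pvFilterPermTrue (new := []) (node := node) (rest := rest) h3
            (by simp) (by simp) hnodevis hnodenotrest (by simp) hdig
          simp only [List.append_nil] at hfp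
          refine List.Perm.trans ?_ (List.Perm.map pvInt hfp.symm)
          rw [List.map_append]
          exact h5.append_right _
        · rw [dif_neg hdig]
          have hfp := pvFilterPermFalse (new := []) (node := node) (rest := rest) h3
            (by simp) (by simp) (by simpa using hdig)
          simp only [List.append_nil] at hfp
          exact List.Perm.trans h5 (List.Perm.map pvInt hfp.symm))
      h6
    exact ⟨g1, g2, g3, g4, g5⟩

theorem dfsLoop_spec (graph : List (String × List String)) (s : String) :
    ∀ (stack : List String) (vis : PySem.Set String) (objs : List Int),
    (∀ x ∈ stack, Reach graph s x) →
    (∀ v ∈ vis, Reach graph s v) →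
    (∀ v ∈ vis, ∀ n ∈ Nb graph v, n ∈ vis ∨ n ∈ stack) →
    vis.Nodup →
    objs = (vis.filter PySem.Str.strIsdigit).map pvInt →
    (∀ x ∈ stack, x ∈ (dfsLoop graph stack vis objs).1) ∧
    (∀ v ∈ vis, v ∈ (dfsLoop graph stack vis objs).1) ∧
    (∀ v ∈ (dfsLoop graph stack vis objs).1, Reach graph s v) ∧
    (∀ v ∈ (dfsLoop graph stack vis objs).1, ∀ n ∈ Nb graph v, n ∈ (dfsLoop graph stack vis objs).1) ∧
    (dfsLoop graph stack vis objs).1.Nodup ∧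
    (dfsLoop graph stack vis objs).2 = ((dfsLoop graph stack vis objs).1.filter PySem.Str.strIsdigit).map pvInt := by
  intro stack vis objs
  induction stack, vis, objs using dfsLoop.induct (graph := graph) with
  | case1 vis objs =>
    intro h0 h1 h2 h3 h4
    rw [show dfsLoop graph [] vis objs = (vis, objs) from by rw [dfsLoop]]
    refine ⟨by simp, fun v hv => hv, h1, ?_, h3, h4⟩
    intro v hv n hn
    rcases h2 v hv n hn with h | h
    · exact h
    · simp at h
  | case2 vis objs node rest hc ih =>
    intro h0 h1 h2 h3 h4
    have hnode : node ∈ vis := by simpa [List.contains_iff_mem] using hc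
    rw [show dfsLoop graph (node :: rest) vis objs = dfsLoop graph rest vis objs from by
      rw [dfsLoop]; rw [dif_pos hc]]
    obtain ⟨g0, g1, g2, g3, g4, g5⟩ := ih
      (fun x hx => h0 x (List.mem_cons_of_mem _ hx)) h1
      (by
        intro v hv n hn
        rcases h2 v hv n hn with h | h
        · exact Or.inl h
        · rcases List.mem_cons.mp h with rfl | h
          · exact Or.inl hnode
          · exact Or.inr h)
      h3 h4
    refine ⟨?_, g1, g2, g3, g4, g5⟩
    intro x hx
    rcases List.mem_cons.mp hx with rfl | hx
    · exact g1 x hnode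
    · exact g0 x hx
  | case3 vis objs node rest hc ih =>
    intro h0 h1 h2 h3 h4
    have hnv : node ∉ vis := by simpa [List.contains_iff_mem] using hc
    have hadd : PySem.Set.add vis node = vis ++ [node] := by
      simp only [PySem.Set.add]
      rw [if_neg hc]
    have hReachNode : Reach graph s node := h0 node List.mem_cons_self
    rw [show dfsLoop graph (node :: rest) vis objs =
        dfsLoop graph ((PySem.Dict.getD (PySem.Dict.mk graph) node []).reverse ++ rest)
          (vis ++ [node])
          (if PySem.Str.strIsdigit node then objs ++ [pvInt node] else objs) from by
      rw [dfsLoop]; rw [dif_neg hc, hadd]]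
    rw [hadd] at ih
    obtain ⟨g0, g1, g2, g3, g4, g5⟩ := ih
      (by
        intro x hx
        rcases List.mem_append.mp hx with hx | hx
        · exact Reach.step hReachNode (List.mem_reverse.mp hx)
        · exact h0 x (List.mem_cons_of_mem _ hx))
      (by
        intro v hv
        rcases List.mem_append.mp hv with hv | hv
        · exact h1 v hv
        · rw [List.mem_singleton.mp hv]; exact hReachNode)
      (by
        intro v hv n hn
        rcases List.mem_append.mp hv with hv | hv
        · rcases h2 v hv n hn with h | h
          · exact Or.inl (List.mem_append_left _ h)
          · rcases List.mem_cons.mp h with rfl | h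
            · exact Or.inl (List.mem_append_right _ (List.mem_singleton.mpr rfl))
            · exact Or.inr (List.mem_append_right _ h)
        · rw [List.mem_singleton.mp hv] at hn
          exact Or.inr (List.mem_append_left _ (List.mem_reverse.mpr hn)))
      (by
        refine List.Nodup.append h3 (List.nodup_singleton _) ?_
        intro a ha ha'
        rw [List.mem_singleton.mp ha'] at ha
        exact hnv ha)
      (by
        by_cases hdig : PySem.Str.strIsdigit node = true
        · rw [dif_pos hdig]
          rw [List.filter_append, List.map_append, ← h4]
          have hdig' : PySem.Chars.strIsdigit node.toList = true := by simpa using hdig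
          simp [hdig']
        · rw [dif_neg hdig]
          rw [List.filter_append, List.map_append, ← h4]
          have hdig' : ¬ PySem.Chars.strIsdigit node.toList = true := by simpa using hdig
          simp [hdig'])
    refine ⟨?_, ?_, g2, g3, g4, g5⟩
    · intro x hx
      rcases List.mem_cons.mp hx with rfl | hx
      · exact g1 x (List.mem_append_right _ (List.mem_singleton.mpr rfl))
      · exact g0 x (List.mem_append_right _ hx)
    · intro v hv
      exact g1 v (List.mem_append_left _ hv)

-- ===== VERDICT (by name: the statement is the Claim_ definition above) =====
theorem bfs_spec : Claim_equal_bfs := by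
  intro graph start _
  unfold Spec_bfs bfs bfs_alt
  obtain ⟨ha1, ha2, ha3, ha4, ha5⟩ := bfsLoop_spec graph start
    (PySem.Set.add PySem.Set.empty start) [start] []
    (by intro q hq; simpa [PySem.Set.add, PySem.Set.empty] using hq)
    (by simp) (by simp [PySem.Set.add, PySem.Set.empty])
    (by intro v hv hnq; simp [PySem.Set.add, PySem.Set.empty] at hv; simp [hv] at hnq)
    (by simp) (by intro v hv; simp [PySem.Set.add, PySem.Set.empty] at hv; subst hv; exact Reach.base)
  obtain ⟨hb0, hb1, hb2, hb3, hb4, hb5⟩ := dfsLoop_spec graph start [start] PySem.Set.empty []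
    (by intro x hx; simp at hx; subst hx; exact Reach.base)
    (by simp [PySem.Set.empty]) (by simp [PySem.Set.empty]) (by simp [PySem.Set.empty])
    (by simp [PySem.Set.empty])
  set A := bfsLoop graph (PySem.Set.add PySem.Set.empty start) [start] [] with hA
  set B := dfsLoop graph [start] PySem.Set.empty [] with hB
  have hstartA : start ∈ A.1 := ha1 start (by simp [PySem.Set.add, PySem.Set.empty])
  have hstartB : start ∈ B.1 := hb0 start (by simp)
  have hmemiff : ∀ x, x ∈ A.1 ↔ x ∈ B.1 := by
    intro x
    constructor
    · exact fun hx => reach_subset hstartB hb3 x (ha2 x hx)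
    · exact fun hx => reach_subset hstartA ha3 x (hb2 x hx)
  have hperm : A.1.Perm B.1 := (List.perm_ext_iff_of_nodup ha4 hb4).mpr hmemiff
  have hobjs : A.2.Perm B.2 := by
    rw [hb5]
    exact ha5.trans (List.Perm.map pvInt (hperm.filter PySem.Str.strIsdigit))
  exact PySem.List.sorted_eq_sorted_of_perm A.2 B.2 (fun x => x) (fun a b hab => hab) hobjs
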